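-- pv_equiv track=rewrite | github.com/cjstmdgusqw/rabbit_python | 8(풀었음).py | solution
-- ===== SOURCE A (Python) =====
-- def solution(left, right):
--     answer = 0
--     O = []
--     for i in range(left, right+1):
--         V = []
--         for j in range(1, i+1):
--             if i % j == 0:
--                 V.append(j)
--         if len(V) % 2 == 0:
--             O.append(i)
--         else:
--             O.append(-i)
--         answer = sum(O)
--     return answer
-- ===== SOURCE B (Python) =====
-- def solution(left, right):
--     # An integer i >= 1 has an odd number of divisors exactly when it is a
--     # perfect square, so walk the range once keeping a pointer k to the next
--     # square instead of counting divisors of every i.  The starting pointer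
--     # (smallest k >= 1 with k*k >= left) is found by doubling + binary search.
--     hi = 1
--     while hi * hi < left:
--         hi *= 2
--     lo = 1
--     while lo < hi:
--         mid = (lo + hi) // 2
--         if mid * mid < left:
--             lo = mid + 1
--         else:
--             hi = mid
--     k = lo
--     total = 0
--     for i in range(left, right + 1):
--         if i == k * k:
--             total -= i
--             k += 1
--         else:
--             total += i
--     return total
-- ===== Notes on version B (the rewrite author's own statement) =====
-- stated objective: alternative
-- what changed: Replaces the per-element divisor-counting inner loop and the repeatedly re-summed list with a single running sum that negates exactly the perfect squares, detected by a pointer to the next square (initialised by a doubling + binary search) that advances with the range; it trades A's divisor scans for a square-pointer invariant.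
import Mathlib
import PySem

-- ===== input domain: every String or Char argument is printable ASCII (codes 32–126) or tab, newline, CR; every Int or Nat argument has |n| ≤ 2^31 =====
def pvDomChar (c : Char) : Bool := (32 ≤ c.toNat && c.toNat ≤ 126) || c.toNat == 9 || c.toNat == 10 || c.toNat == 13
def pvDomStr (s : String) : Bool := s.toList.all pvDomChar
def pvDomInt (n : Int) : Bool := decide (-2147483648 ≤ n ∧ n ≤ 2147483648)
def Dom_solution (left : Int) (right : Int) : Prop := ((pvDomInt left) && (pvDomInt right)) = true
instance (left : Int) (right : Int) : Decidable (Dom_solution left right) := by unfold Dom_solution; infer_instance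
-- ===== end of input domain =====

-- B replaces A's per-element divisor-count inner loop (and re-summed list) by one running
-- sum that negates exactly the perfect squares, found with a pointer to the next square;
-- objective: alternative (a different algorithm for the same values).

-- ===== PORT A =====
def solution (left : Int) (right : Int) : Int :=
  ((PySem.List.pyRange left (right + 1) 1).foldl
    (fun (st : Int × List Int) i =>
      let V : List Int := (PySem.List.pyRange 1 (i + 1) 1).foldl
        (fun V j => if PySem.Int.mod i j == 0 then V ++ [j] else V) []
      let O : List Int := st.2 ++ [if V.length % 2 == 0 then i else -i]
      (O.sum, O))
    (0, [])).1

-- ===== PORT B =====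
-- B's doubling loop 'while hi*hi < left: hi *= 2' (the '1 ≤ hi' conjunct only makes the
-- recursion total; B only calls it with hi = 1 and hi stays ≥ 1)
def growHi (left : Int) (hi : Int) : Int :=
  if 1 ≤ hi ∧ hi * hi < left then growHi left (2 * hi) else hi
termination_by (left - hi).toNat
decreasing_by
  have hle : hi ≤ hi * hi := by nlinarith
  omega

-- B's binary-search loop 'while lo < hi: ...'
def binSearch (left : Int) (lo : Int) (hi : Int) : Int :=
  if lo < hi then
    let mid := PySem.Int.floordiv (lo + hi) 2
    if mid * mid < left then binSearch left (mid + 1) hi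
    else binSearch left lo mid
  else lo
termination_by (hi - lo).toNat
decreasing_by
  · have : mid = (lo + hi) / 2 := PySem.Int.floordiv_eq_ediv_of_pos (by omega)
    omega
  · have : mid = (lo + hi) / 2 := PySem.Int.floordiv_eq_ediv_of_pos (by omega)
    omega

def solution_alt (left : Int) (right : Int) : Int :=
  let k0 := binSearch left 1 (growHi left 1)
  ((PySem.List.pyRange left (right + 1) 1).foldl
    (fun (st : Int × Int) i =>
      if i == st.2 * st.2 then (st.1 - i, st.2 + 1) else (st.1 + i, st.2))
    (0, k0)).1

-- ===== PRECONDITION & SPEC =====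
def Spec_solution (left : Int) (right : Int) (out : Int) : Prop := out = solution_alt left right
instance (left : Int) (right : Int) (out : Int) : Decidable (Spec_solution left right out) := by unfold Spec_solution; infer_instance

-- ===== CLAIM (what is proved, stated in full; the proofs are below) =====
def Claim_equal_solution : Prop := ∀ (left : Int) (right : Int), Dom_solution left right → Spec_solution left right (solution left right)

-- ===== LEMMAS AND PROOFS =====

-- the per-element contribution computed by A's inner loop
def pvG (i : Int) : Int :=
  if ((PySem.List.pyRange 1 (i + 1) 1).foldl
        (fun V j => if PySem.Int.mod i j == 0 then V ++ [j] else V) ([] : List Int)).length % 2 == 0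
  then i else -i

-- the mathematical per-element value: negate perfect squares ≥ 1
def pvF (i : Int) : Int :=
  if 1 ≤ i ∧ Nat.sqrt i.toNat * Nat.sqrt i.toNat = i.toNat then -i else i

theorem pv_countP_range_card (n : Nat) (p : Nat → Prop) [DecidablePred p] :
    (List.range n).countP (fun k => decide (p k)) = ((Finset.range n).filter p).card := by
  induction n with
  | zero => simp
  | succ n ih =>
    rw [List.range_succ, Finset.range_add_one]
    by_cases h : p n
    · rw [Finset.filter_insert, if_pos h, Finset.card_insert_of_notMem (by simp)]
      simp [List.countP_append, ih, h]
    · rw [Finset.filter_insert, if_neg h]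
      simp [List.countP_append, ih, h]

-- number of divisors of n among 1..n, as a Finset card
theorem pv_card_shift (n : Nat) (hn : n ≠ 0) :
    ((Finset.range n).filter (fun k => (1 + k) ∣ n)).card = n.divisors.card := by
  apply Finset.card_bij (fun k _ => 1 + k)
  · intro k hk
    simp only [Finset.mem_filter, Finset.mem_range] at hk
    exact Nat.mem_divisors.mpr ⟨hk.2, hn⟩
  · intro a ha b hb hab; omega
  · intro d hd
    rcases Nat.mem_divisors.mp hd with ⟨hdvd, -⟩
    have h1 : 1 ≤ d := Nat.one_le_iff_ne_zero.mpr (by rintro rfl; exact hn (Nat.eq_zero_of_zero_dvd hdvd))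
    have hle : d ≤ n := Nat.le_of_dvd (Nat.pos_of_ne_zero hn) hdvd
    have hd1 : 1 + (d - 1) = d := by omega
    refine ⟨d - 1, Finset.mem_filter.mpr ⟨Finset.mem_range.mpr (by omega), by rw [hd1]; exact hdvd⟩, by omega⟩

-- parity of the divisor count: odd iff n is a perfect square
theorem pv_divisors_parity (n : Nat) (hn : n ≠ 0) :
    n.divisors.card % 2 = 0 ↔ ¬ (Nat.sqrt n * Nat.sqrt n = n) := by
  classical
  have hpos : 0 < n := Nat.pos_of_ne_zero hn
  set S := n.divisors.filter (fun d => d * d < n) with hS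
  set L := n.divisors.filter (fun d => n < d * d) with hL
  set M := n.divisors.filter (fun d => d * d = n) with hM
  have hsplit : n.divisors.card = S.card + (M.card + L.card) := by
    rw [hS, hL, hM]
    rw [← Finset.card_filter_add_card_filter_not (s := n.divisors) (p := fun d => d * d < n)]
    congr 1
    rw [← Finset.card_filter_add_card_filter_not
      (s := n.divisors.filter (fun d => ¬ d * d < n)) (p := fun d => d * d = n)]
    congr 1
    · rw [Finset.filter_filter]
      congr 1
      apply Finset.filter_congr
      intro d _
      exact ⟨fun h => h.2, fun h => ⟨by omega, h⟩⟩
    · rw [Finset.filter_filter]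
      congr 1
      apply Finset.filter_congr
      intro d _
      exact ⟨fun h => by omega, fun h => ⟨by omega, by omega⟩⟩
  have hdiv_pos : ∀ d ∈ n.divisors, 0 < d ∧ d ∣ n := by
    intro d hd
    rcases Nat.mem_divisors.mp hd with ⟨hdvd, -⟩
    refine ⟨Nat.pos_of_ne_zero ?_, hdvd⟩
    rintro rfl; exact hn (Nat.eq_zero_of_zero_dvd hdvd)
  have hSL : S.card = L.card := by
    apply Finset.card_bij (fun d _ => n / d)
    · intro d hd
      simp only [hS, hL, Finset.mem_filter] at hd ⊢
      obtain ⟨hpos', hdvd⟩ := hdiv_pos d hd.1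
      have he : d * (n / d) = n := Nat.mul_div_cancel' hdvd
      refine ⟨Nat.mem_divisors.mpr ⟨Nat.div_dvd_of_dvd hdvd, hn⟩, ?_⟩
      have hlt : d < n / d := by nlinarith [hd.2]
      nlinarith
    · intro a ha b hb hab
      simp only [hS, Finset.mem_filter] at ha hb
      obtain ⟨hpa, hda⟩ := hdiv_pos a ha.1
      obtain ⟨hpb, hdb⟩ := hdiv_pos b hb.1
      have h1 : a * (n / a) = n := Nat.mul_div_cancel' hda
      have h2 : b * (n / b) = n := Nat.mul_div_cancel' hdb
      have hqpos : 0 < n / b := Nat.div_pos (Nat.le_of_dvd hpos hdb) hpb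
      have h1' : a * (n / b) = n := by rw [← hab]; exact h1
      exact Nat.eq_of_mul_eq_mul_right hqpos (by omega)
    · intro e he
      simp only [hL, Finset.mem_filter] at he
      obtain ⟨hpe, hde⟩ := hdiv_pos e he.1
      have h1 : e * (n / e) = n := Nat.mul_div_cancel' hde
      have hdpos : 0 < n / e := Nat.div_pos (Nat.le_of_dvd hpos hde) hpe
      refine ⟨n / e, ?_, ?_⟩
      · simp only [hS, Finset.mem_filter]
        refine ⟨Nat.mem_divisors.mpr ⟨Nat.div_dvd_of_dvd hde, hn⟩, ?_⟩
        nlinarith [he.2]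
      · have : n / e ∣ n := Nat.div_dvd_of_dvd hde
        have h2 : (n / e) * (n / (n / e)) = n := Nat.mul_div_cancel' this
        nlinarith
  have hMcard : M.card = (if Nat.sqrt n * Nat.sqrt n = n then 1 else 0) := by
    split_ifs with hsq
    · have hdvd : Nat.sqrt n ∣ n := ⟨Nat.sqrt n, hsq.symm⟩
      have : M = {Nat.sqrt n} := by
        apply Finset.eq_singleton_iff_unique_mem.mpr
        refine ⟨?_, ?_⟩
        · simp only [hM, Finset.mem_filter]
          exact ⟨Nat.mem_divisors.mpr ⟨hdvd, hn⟩, hsq⟩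
        · intro d hd
          simp only [hM, Finset.mem_filter] at hd
          have := hd.2.trans hsq.symm
          exact Nat.mul_self_inj.mp this
      rw [this]; simp
    · have : M = ∅ := by
        apply Finset.filter_eq_empty_iff.mpr
        intro d _ hcontra
        exact hsq ((Nat.exists_mul_self n).mp ⟨d, hcontra⟩)
      simp [this]
  constructor
  · intro heven hsq
    rw [hsplit, hMcard, if_pos hsq, ← hSL] at heven
    omega
  · intro hnsq
    rw [hsplit, hMcard, if_neg hnsq, ← hSL]
    omega

-- A's inner divisor loop, pointwise: pvG = pvF
theorem pvG_eq_pvF (i : Int) : pvG i = pvF i := by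
  by_cases hle : i ≤ 0
  · have hnil : PySem.List.pyRange 1 (i + 1) 1 = [] :=
      PySem.List.pyRange_one_eq_nil (by omega)
    have h1 : ¬ (1 ≤ i ∧ Nat.sqrt i.toNat * Nat.sqrt i.toNat = i.toNat) := by
      rintro ⟨h, -⟩; omega
    simp [pvG, pvF, hnil, h1]
  · obtain ⟨n, rfl⟩ : ∃ n : Nat, i = (n : Int) := ⟨i.toNat, by omega⟩
    have hn0 : n ≠ 0 := by omega
    have hfoldfilter :
        (PySem.List.pyRange 1 ((n : Int) + 1) 1).foldl
          (fun V j => if PySem.Int.mod (n : Int) j == 0 then V ++ [j] else V) ([] : List Int)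
        = (PySem.List.pyRange 1 ((n : Int) + 1) 1).filter
            (fun j => PySem.Int.mod (n : Int) j == 0) := by
      rw [PySem.List.foldl_append_if_eq_filter]; simp
    have hrange : PySem.List.pyRange 1 ((n : Int) + 1) 1
        = (List.range n).map (fun k : Nat => 1 + (k : Int)) := by
      rw [PySem.List.pyRange_one]
      simp
    have hcount : ((PySem.List.pyRange 1 ((n : Int) + 1) 1).filter
        (fun j => PySem.Int.mod (n : Int) j == 0)).length = n.divisors.card := by
      rw [← List.countP_eq_length_filter, hrange, List.countP_map]
      rw [← pv_card_shift n hn0, ← pv_countP_range_card]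
      apply List.countP_congr
      intro k hk
      simp only [Function.comp_apply, beq_iff_eq, decide_eq_true_eq]
      rw [PySem.Int.mod_eq_zero_iff_dvd]
      constructor
      · intro h; exact_mod_cast h
      · intro h; exact_mod_cast h
    have h1i : (1 : Int) ≤ (n : Int) := by omega
    unfold pvG pvF
    rw [hfoldfilter, hcount]
    simp only [Int.toNat_natCast]
    by_cases hsq : Nat.sqrt n * Nat.sqrt n = n
    · have hodd : ¬ n.divisors.card % 2 = 0 := by
        intro h; exact ((pv_divisors_parity n hn0).mp h) hsq
      simp only [beq_iff_eq]
      rw [if_neg hodd, if_pos ⟨h1i, hsq⟩]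
    · have heven : n.divisors.card % 2 = 0 := (pv_divisors_parity n hn0).mpr hsq
      simp only [beq_iff_eq]
      rw [if_pos heven, if_neg (by rintro ⟨-, h⟩; exact hsq h)]

-- A's outer fold returns the running list and its sum
theorem pv_foldA (L : List Int) (s : List Int) :
    L.foldl
      (fun (st : Int × List Int) i =>
        let V : List Int := (PySem.List.pyRange 1 (i + 1) 1).foldl
          (fun V j => if PySem.Int.mod i j == 0 then V ++ [j] else V) []
        let O : List Int := st.2 ++ [if V.length % 2 == 0 then i else -i]
        (O.sum, O))
      (s.sum, s)
    = ((s ++ L.map pvG).sum, s ++ L.map pvG) := by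
  induction L generalizing s with
  | nil => simp
  | cons a L ih =>
    simp only [List.foldl_cons, List.map_cons]
    have hstep :
        (let V : List Int := (PySem.List.pyRange 1 (a + 1) 1).foldl
            (fun V j => if PySem.Int.mod a j == 0 then V ++ [j] else V) []
         let O : List Int := s ++ [if V.length % 2 == 0 then a else -a]
         ((O.sum : Int), O)) = ((s ++ [pvG a]).sum, s ++ [pvG a]) := by
      simp only [pvG]
    rw [hstep, ih (s ++ [pvG a])]
    simp

theorem pv_solution_eq_sum (left right : Int) :
    solution left right = ((PySem.List.pyRange left (right + 1) 1).map pvG).sum := by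
  unfold solution
  have h0 : ((0 : Int), ([] : List Int)) = (([] : List Int).sum, ([] : List Int)) := by simp
  rw [h0, pv_foldA]
  simp

-- spec of B's doubling loop
theorem pv_growHi_spec (left hi : Int) (h1 : 1 ≤ hi) :
    1 ≤ growHi left hi ∧ left ≤ growHi left hi * growHi left hi := by
  fun_induction growHi left hi with
  | case1 hi hcond ih => exact ih (by omega)
  | case2 hi hcond =>
    refine ⟨h1, ?_⟩
    rcases not_and_or.mp hcond with h | h
    · omega
    · omega

-- spec of B's binary-search loop: the result s satisfies left ≤ s² and (s-1)² < left (or s = 1)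
theorem pv_binSearch_spec (left lo hi : Int) (h1 : 1 ≤ lo) (hlh : lo ≤ hi)
    (hhi : left ≤ hi * hi) (hlo : lo = 1 ∨ (lo - 1) * (lo - 1) < left) :
    1 ≤ binSearch left lo hi ∧ left ≤ binSearch left lo hi * binSearch left lo hi ∧
      (binSearch left lo hi = 1 ∨
        (binSearch left lo hi - 1) * (binSearch left lo hi - 1) < left) := by
  fun_induction binSearch left lo hi with
  | case1 lo hi hlt mid hmid ih =>
    have hmideq : mid = (lo + hi) / 2 := PySem.Int.floordiv_eq_ediv_of_pos (by omega)
    exact ih (by omega) (by omega) hhi (Or.inr (by have : mid + 1 - 1 = mid := by ring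
                                                   rw [this]; exact hmid))
  | case2 lo hi hlt mid hmid ih =>
    have hmideq : mid = (lo + hi) / 2 := PySem.Int.floordiv_eq_ediv_of_pos (by omega)
    exact ih h1 (by omega) (by omega) hlo
  | case3 lo hi hlt =>
    have : lo = hi := by omega
    exact ⟨h1, by rw [this]; exact hhi, hlo⟩

-- B's main fold computes the running sum of pvF, given the next-square-pointer invariant
theorem pv_foldB (m : Nat) : ∀ (a b t k : Int), (b - a).toNat = m →
    1 ≤ k → a ≤ k * k → (k = 1 ∨ (k - 1) * (k - 1) < a) →
    ((PySem.List.pyRange a b 1).foldl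
      (fun (st : Int × Int) i =>
        if i == st.2 * st.2 then (st.1 - i, st.2 + 1) else (st.1 + i, st.2))
      (t, k)).1
    = t + ((PySem.List.pyRange a b 1).map pvF).sum := by
  induction m with
  | zero =>
    intro a b t k hm _ _ _
    rw [PySem.List.pyRange_one_eq_nil (by omega)]
    simp
  | succ m ih =>
    intro a b t k hm hk1 hak hinv
    rw [PySem.List.pyRange_one_cons (by omega)]
    simp only [List.foldl_cons, List.map_cons, List.sum_cons]
    by_cases hsq : a = k * k
    · rw [if_pos (by simpa using hsq)]
      have hfa : pvF a = -a := by
        unfold pvF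
        have h1 : (1:Int) ≤ a := by nlinarith
        have hnat : a.toNat = k.toNat * k.toNat := by
          have hk0 : (0:Int) ≤ k := by omega
          have : ((k.toNat * k.toNat : Nat) : Int) = k * k := by
            push_cast [Int.toNat_of_nonneg hk0]; ring
          omega
        rw [if_pos ⟨h1, by rw [hnat, Nat.sqrt_eq]⟩]
      rw [ih (a + 1) b (t - a) (k + 1) (by omega) (by omega) (by nlinarith)
        (by right; nlinarith)]
      rw [hfa]; ring
    · rw [if_neg (by simpa using hsq)]
      have hfa : pvF a = a := by
        unfold pvF
        rw [if_neg ?_]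
        rintro ⟨h1, hs⟩
        set s := Nat.sqrt a.toNat with hsdef
        have hs1 : 1 ≤ s := by
          rcases Nat.eq_zero_or_pos s with h | h
          · rw [h] at hs; simp at hs; omega
          · exact h
        have hsa : (s : Int) * (s : Int) = a := by
          have h2 := Int.toNat_of_nonneg (by omega : (0:Int) ≤ a)
          have h3 : ((s * s : Nat) : Int) = ((a.toNat : Nat) : Int) := by rw [hs]
          push_cast at h3
          omega
        have hsk : (s : Int) ≤ k := by nlinarith [hak, hsa]
        rcases hinv with h | h
        · -- k = 1: a ≤ 1 and a ≥ 1 gives a = 1 = k*k, contradiction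
          apply hsq
          have : a = 1 := by nlinarith [hak, h]
          rw [this, h]; ring
        · have hks : k - 1 < (s : Int) := by nlinarith [h, hsa]
          apply hsq
          have : (s : Int) = k := by omega
          rw [← hsa, this]
      rw [ih (a + 1) b (t + a) k (by omega) hk1 (by omega) (by rcases hinv with h | h; exact Or.inl h; right; omega)]
      rw [hfa]; ring

theorem pv_solution_alt_eq_sum (left right : Int) :
    solution_alt left right = ((PySem.List.pyRange left (right + 1) 1).map pvF).sum := by
  unfold solution_alt
  obtain ⟨hg1, hg2⟩ := pv_growHi_spec left 1 (by omega)
  obtain ⟨h1, h2, h3⟩ := pv_binSearch_spec left 1 (growHi left 1) (by omega) hg1 hg2 (Or.inl rfl)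
  have := pv_foldB (right + 1 - left).toNat left (right + 1) 0
    (binSearch left 1 (growHi left 1)) rfl h1 h2 h3
  simpa using this

-- ===== VERDICT (by name: the statement is the Claim_ definition above) =====
theorem solution_spec : Claim_equal_solution := by
  intro left right _
  unfold Spec_solution
  rw [pv_solution_eq_sum, pv_solution_alt_eq_sum]
  congr 1
  apply List.map_congr_left
  intro i _
  exact pvG_eq_pvF i
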